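-- pv_equiv track=rewrite | github.com/hendraet/PROTzilla2 | protzilla/data_analysis/spectrum_prediction.py | _annotate_peak_strs
-- ===== SOURCE A (Python) =====
-- def _annotate_peak_strs(
--     peaks: list[str],
--     annotations: list[list[str]],
--     prefix='"',
--     seperator=" ",
--     suffix='"',
--     add_newline=True,
-- ):
--     combined_annotations = [prefix for _ in range(len(peaks))]
--     for annotation in annotations:
--         # preprocess annotations
--         combined_annotations = [
--             current_annotation_str + peak_annotation + seperator
--             for current_annotation_str, peak_annotation in zip(
--                 combined_annotations, annotation
--             )
--         ]
--     # remove last seperator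
--     combined_annotations = [
--         current_annotation_str[:-1]
--         for current_annotation_str in combined_annotations
--     ]
--     combined_annotations = [
--         current_annotation_str + suffix
--         for current_annotation_str in combined_annotations
--     ]
--     new_peaks = [
--         f"{peak}\t{annotation}"
--         for peak, annotation in zip(peaks, combined_annotations)
--     ]
--     if add_newline:
--         new_peaks = [f"{peak}\n" for peak in new_peaks]
--     return new_peaks
-- ===== SOURCE B (Python) =====
-- def _annotate_peak_strs(
--     peaks: list[str],
--     annotations: list[list[str]],
--     prefix='"',
--     seperator=" ",
--     suffix='"',
--     add_newline=True,
-- ):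
--     # row-major single pass: one accumulator per output line
--     n = len(peaks)
--     for annotation in annotations:
--         n = min(n, len(annotation))
--     out = []
--     for i in range(n):
--         s = prefix
--         for annotation in annotations:
--             s = s + annotation[i] + seperator
--         s = s[:-1] + suffix
--         line = peaks[i] + "\t" + s
--         if add_newline:
--             line = line + "\n"
--         out.append(line)
--     return out
-- ===== Notes on version B (the rewrite author's own statement) =====
-- stated objective: simpler
-- what changed: Replaces the column-major sweep (rebuilding one list per annotation layer plus three more cleanup/zip passes) with a single row-major pass that truncates to the common length up front and builds each output line in one inner loop.
import Mathlib
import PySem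

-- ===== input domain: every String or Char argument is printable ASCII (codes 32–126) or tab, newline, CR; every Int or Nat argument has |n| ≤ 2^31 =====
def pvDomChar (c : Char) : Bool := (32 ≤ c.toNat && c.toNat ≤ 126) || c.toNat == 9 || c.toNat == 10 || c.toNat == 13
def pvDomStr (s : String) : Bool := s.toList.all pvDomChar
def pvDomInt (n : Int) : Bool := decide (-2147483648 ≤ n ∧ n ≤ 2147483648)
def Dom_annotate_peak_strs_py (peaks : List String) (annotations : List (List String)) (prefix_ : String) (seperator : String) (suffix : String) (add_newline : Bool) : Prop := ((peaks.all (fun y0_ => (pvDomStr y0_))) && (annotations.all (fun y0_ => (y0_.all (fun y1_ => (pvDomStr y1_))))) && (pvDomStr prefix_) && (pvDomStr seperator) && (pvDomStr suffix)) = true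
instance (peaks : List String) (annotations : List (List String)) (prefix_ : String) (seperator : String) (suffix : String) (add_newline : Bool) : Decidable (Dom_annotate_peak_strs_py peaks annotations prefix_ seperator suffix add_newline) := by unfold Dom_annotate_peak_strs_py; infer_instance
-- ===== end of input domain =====

-- B replaces A's column-major layer sweep (one rebuilt list per annotation layer plus separate
-- strip/suffix/zip/newline passes) with a single row-major pass over the truncated common length;
-- same return value (objective: simpler). Python str values are carried as List Char inside both
-- ports (exact for str concatenation; s[:-1] is List.dropLast).

-- ===== PORT A =====
def annotate_peak_strs_py (peaks : List String) (annotations : List (List String)) (prefix_ : String) (seperator : String) (suffix : String) (add_newline : Bool) : List String :=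
  -- combined_annotations = [prefix for _ in range(len(peaks))]
  let combined0 : List (List Char) := peaks.map (fun _ => prefix_.toList)
  -- for annotation in annotations: combined = [c + a + sep for c, a in zip(combined, annotation)]
  let combined1 : List (List Char) := annotations.foldl
    (fun acc annotation =>
      (acc.zip (annotation.map String.toList)).map (fun cp => cp.1 ++ cp.2 ++ seperator.toList))
    combined0
  -- combined = [c[:-1] for c in combined]
  let combined2 : List (List Char) := combined1.map (fun s => s.dropLast)
  -- combined = [c + suffix for c in combined]
  let combined3 : List (List Char) := combined2.map (fun s => s ++ suffix.toList)
  -- new_peaks = [f"{peak}\t{annotation}" for peak, annotation in zip(peaks, combined)]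
  let newPeaks : List (List Char) :=
    (peaks.zip combined3).map (fun pc => pc.1.toList ++ '\t' :: pc.2)
  -- if add_newline: new_peaks = [p + "\n" for p in new_peaks]
  let newPeaks := if add_newline then newPeaks.map (fun s => s ++ ['\n']) else newPeaks
  newPeaks.map (fun cs => String.ofList cs)

-- ===== PORT B =====
def annotate_peak_strs_py_alt (peaks : List String) (annotations : List (List String)) (prefix_ : String) (seperator : String) (suffix : String) (add_newline : Bool) : List String :=
  -- n = len(peaks); for annotation in annotations: n = min(n, len(annotation))
  let n : Nat := annotations.foldl (fun m a => min m a.length) peaks.length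
  -- for i in range(n): build one line in an inner loop over the layers and append it
  (List.range n).foldl
    (fun out i =>
      let s : List Char := annotations.foldl
        (fun s annotation => s ++ (annotation.getD i "").toList ++ seperator.toList)
        prefix_.toList
      let s := s.dropLast ++ suffix.toList
      let line := (peaks.getD i "").toList ++ '\t' :: s
      let line := if add_newline then line ++ ['\n'] else line
      out ++ [String.ofList line])
    []

-- ===== PRECONDITION & SPEC =====
def Spec_annotate_peak_strs_py (peaks : List String) (annotations : List (List String)) (prefix_ : String) (seperator : String) (suffix : String) (add_newline : Bool) (out : List String) : Prop := out = annotate_peak_strs_py_alt peaks annotations prefix_ seperator suffix add_newline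
instance (peaks : List String) (annotations : List (List String)) (prefix_ : String) (seperator : String) (suffix : String) (add_newline : Bool) (out : List String) : Decidable (Spec_annotate_peak_strs_py peaks annotations prefix_ seperator suffix add_newline out) := by unfold Spec_annotate_peak_strs_py; infer_instance

-- ===== CLAIM (what is proved, stated in full; the proofs are below) =====
def Claim_equal_annotate_peak_strs_py : Prop := ∀ (peaks : List String) (annotations : List (List String)) (prefix_ : String) (seperator : String) (suffix : String) (add_newline : Bool), Dom_annotate_peak_strs_py peaks annotations prefix_ seperator suffix add_newline → Spec_annotate_peak_strs_py peaks annotations prefix_ seperator suffix add_newline (annotate_peak_strs_py peaks annotations prefix_ seperator suffix add_newline)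

-- ===== LEMMAS AND PROOFS =====

-- the running minimum of the layer lengths never exceeds its starting value
theorem anps_foldl_min_le {α : Type} (L : List (List α)) (m : Nat) :
    L.foldl (fun m a => min m a.length) m ≤ m := by
  induction L generalizing m with
  | nil => simp
  | cons a L ih => exact le_trans (ih _) (Nat.min_le_left _ _)

-- A's column-major zip-map fold, characterised row by row
theorem anps_foldA_char (sep : List Char) (L : List (List (List Char))) (c0 : List (List Char)) :
    L.foldl (fun acc ann => (acc.zip ann).map (fun cp => cp.1 ++ cp.2 ++ sep)) c0
      = (List.range (L.foldl (fun m a => min m a.length) c0.length)).map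
          (fun i => L.foldl (fun s a => s ++ a.getD i [] ++ sep) (c0.getD i [])) := by
  induction L generalizing c0 with
  | nil =>
    simp only [List.foldl_nil]
    apply List.ext_getElem
    · simp
    · intro i h1 h2
      simp [List.getD_eq_getElem?_getD, List.getElem?_eq_getElem (by simpa using h2)]
  | cons a L ih =>
    simp only [List.foldl_cons]
    rw [ih]
    have hlen : ((c0.zip a).map (fun cp => cp.1 ++ cp.2 ++ sep)).length = min c0.length a.length := by
      simp
    rw [hlen]
    apply List.map_congr_left
    intro i hi
    have hi' : i < L.foldl (fun m a => min m a.length) (min c0.length a.length) := by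
      simpa using List.mem_range.mp hi
    have hmin : i < min c0.length a.length :=
      lt_of_lt_of_le hi' (anps_foldl_min_le _ _)
    have hgd : ((c0.zip a).map (fun cp => cp.1 ++ cp.2 ++ sep)).getD i []
        = c0.getD i [] ++ a.getD i [] ++ sep := by
      have h1 : i < c0.length := lt_of_lt_of_le hmin (Nat.min_le_left _ _)
      have h2 : i < a.length := lt_of_lt_of_le hmin (Nat.min_le_right _ _)
      simp [List.getD_eq_getElem?_getD, h1, h2, List.getElem_zip]
    rw [hgd]

-- zipping a list with a map over range n (n within bounds) is a map over range n
theorem anps_zip_map_range (peaks : List String) (n : Nat) (G : Nat → List Char)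
    (h : n ≤ peaks.length) :
    peaks.zip ((List.range n).map G)
      = (List.range n).map (fun i => (peaks.getD i "", G i)) := by
  apply List.ext_getElem
  · simp [Nat.min_eq_right h]
  · intro i h1 h2
    have hi : i < n := by simpa using h2
    have hip : i < peaks.length := lt_of_lt_of_le hi h
    simp [List.getElem_zip, List.getD_eq_getElem?_getD, List.getElem?_eq_getElem hip]

theorem anps_getD_map_toList (a : List String) (i : Nat) :
    (a.map String.toList).getD i [] = (a.getD i "").toList := by
  simp only [List.getD_eq_getElem?_getD, List.getElem?_map]
  cases a[i]? <;> simp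

theorem anps_minfold_map (annotations : List (List String)) (m : Nat) :
    (annotations.map (List.map String.toList)).foldl (fun m a => min m a.length) m
      = annotations.foldl (fun m a => min m a.length) m := by
  rw [List.foldl_map]; simp

theorem anps_innerfold_map (annotations : List (List String)) (i : Nat) (sep init : List Char) :
    (annotations.map (List.map String.toList)).foldl (fun s a => s ++ a.getD i [] ++ sep) init
      = annotations.foldl (fun s a => s ++ (a.getD i "").toList ++ sep) init := by
  rw [List.foldl_map]
  simp only [anps_getD_map_toList]

-- anps_foldA_char specialised to A's actual fold over List String layers
theorem anps_foldA_str (sep p : List Char) (peaks : List String) (annotations : List (List String)) :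
    annotations.foldl
      (fun acc annotation =>
        (acc.zip (annotation.map String.toList)).map (fun cp => cp.1 ++ cp.2 ++ sep))
      (peaks.map (fun _ => p))
    = (List.range (annotations.foldl (fun m a => min m a.length) peaks.length)).map
        (fun i => annotations.foldl (fun s a => s ++ (a.getD i "").toList ++ sep)
          ((peaks.map (fun _ => p)).getD i [])) := by
  have h := anps_foldA_char sep (annotations.map (List.map String.toList)) (peaks.map (fun _ => p))
  rw [List.foldl_map] at h
  simp only [List.length_map, anps_minfold_map, anps_innerfold_map] at h
  exact h

-- ===== VERDICT (by name: the statement is the Claim_ definition above) =====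
theorem annotate_peak_strs_py_spec : Claim_equal_annotate_peak_strs_py := by
  intro peaks annotations prefix_ seperator suffix add_newline _
  unfold Spec_annotate_peak_strs_py
  simp only [annotate_peak_strs_py, annotate_peak_strs_py_alt]
  rw [PySem.List.foldl_append_singleton_eq_map, List.nil_append]
  rw [anps_foldA_str]
  set n := annotations.foldl (fun m a => min m a.length) peaks.length with hn
  have hnle : n ≤ peaks.length := anps_foldl_min_le _ _
  simp only [List.map_map]
  rw [anps_zip_map_range _ _ _ hnle]
  cases add_newline <;>
  · simp only [if_true, if_false, List.map_map, Bool.false_eq_true]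
    apply List.map_congr_left
    intro i hi
    have hip : i < peaks.length := lt_of_lt_of_le (List.mem_range.mp hi) hnle
    simp [Function.comp, List.getD_eq_getElem?_getD, hip]
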